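-- pv_equiv track=rewrite | github.com/zaobasy/advent_of_code | 2020/day_5.py | parse_seat_to_binary
-- ===== SOURCE A (Python) =====
-- def parse_seat_to_binary(seat):
--     """
--     Take a seat identifier BFFFBBFRRR and determine it's binary
--     number
--     """
--
--     replaces = {
--                 'B' : '1',
--                 'F' : '0',
--                 'R' : '1',
--                 'L' : '0',
--                 }
--
--     out_str = seat
--
--     for old, new in replaces.items():
--         out_str = out_str.replace(old, new)
--
--     return out_str
-- ===== SOURCE B (Python) =====
-- def parse_seat_to_binary(seat):
--     """
--     Take a seat identifier BFFFBBFRRR and determine it's binary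
--     number
--     """
--     out = []
--     for c in seat:
--         if c in 'BR':
--             out.append('1')
--         elif c in 'FL':
--             out.append('0')
--         else:
--             out.append(c)
--     return ''.join(out)
-- ===== Notes on version B (the rewrite author's own statement) =====
-- stated objective: idiomatic
-- what changed: Single forward pass with an explicit list accumulator and a two-branch character classification (c in 'BR' vs c in 'FL'), joined once at the end, instead of four successive whole-string .replace passes (and no dict at all).
import Mathlib
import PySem

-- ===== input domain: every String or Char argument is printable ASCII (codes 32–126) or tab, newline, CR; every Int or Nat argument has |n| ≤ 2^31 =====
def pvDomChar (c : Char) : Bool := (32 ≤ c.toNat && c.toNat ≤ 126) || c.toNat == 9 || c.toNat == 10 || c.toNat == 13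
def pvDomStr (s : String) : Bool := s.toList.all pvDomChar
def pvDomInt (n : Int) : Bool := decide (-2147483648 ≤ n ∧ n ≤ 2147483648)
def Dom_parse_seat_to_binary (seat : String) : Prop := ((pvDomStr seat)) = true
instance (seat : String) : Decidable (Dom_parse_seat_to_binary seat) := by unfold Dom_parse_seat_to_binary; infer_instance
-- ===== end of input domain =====

-- B replaces A's four whole-string .replace passes by one forward pass with a list
-- accumulator and a two-branch character classification; objective: idiomatic single pass.

-- ===== PORT A =====
def parse_seat_to_binary (seat : String) : String :=
  let replaces : PySem.Dict String String :=
    PySem.Dict.ofList [("B", "1"), ("F", "0"), ("R", "1"), ("L", "0")]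
  (PySem.Dict.items replaces).foldl
    (fun out_str p => PySem.Str.replace out_str p.1 p.2) seat

-- ===== PORT B =====
-- Source B's loop: out starts empty, each character is appended classified; acc holds out reversed.
-- 'c in "BR"' on a single character is membership of c among the chars of "BR": exact here.
def pvGoB : List Char → List Char → List Char
  | acc, [] => acc.reverse
  | acc, c :: rest =>
      if ("BR".toList.contains c) then pvGoB ('1' :: acc) rest
      else if ("FL".toList.contains c) then pvGoB ('0' :: acc) rest
      else pvGoB (c :: acc) rest

def parse_seat_to_binary_alt (seat : String) : String :=
  String.ofList (pvGoB [] seat.toList)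

-- ===== PRECONDITION & SPEC =====
def Spec_parse_seat_to_binary (seat : String) (out : String) : Prop := out = parse_seat_to_binary_alt seat
instance (seat : String) (out : String) : Decidable (Spec_parse_seat_to_binary seat out) := by unfold Spec_parse_seat_to_binary; infer_instance

-- ===== CLAIM (what is proved, stated in full; the proofs are below) =====
def Claim_equal_parse_seat_to_binary : Prop := ∀ (seat : String), Dom_parse_seat_to_binary seat → Spec_parse_seat_to_binary seat (parse_seat_to_binary seat)

-- ===== LEMMAS AND PROOFS =====

-- the per-character translation both programs implement
def pvChar (c : Char) : Char :=
  if c = 'B' then '1' else if c = 'F' then '0' else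
  if c = 'R' then '1' else if c = 'L' then '0' else c

-- replace.go with a one-character pattern and replacement maps the characters pointwise
theorem pv_go_single (o n : Char) (s : List Char) : ∀ (acc : List Char) (fuel : Nat), s.length ≤ fuel →
    PySem.Chars.replace.go [o] [n] fuel s acc = acc.reverse ++ s.map (fun c => if c = o then n else c) := by
  induction s with
  | nil =>
    intro acc fuel _
    cases fuel <;> simp [PySem.Chars.replace.go]
  | cons c t ih =>
    intro acc fuel hf
    cases fuel with
    | zero => simp at hf
    | succ m =>
      simp only [PySem.Chars.replace.go, List.isPrefixOf]
      by_cases hc : c = o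
      · simp [hc, ih, Nat.lt_succ_iff.mp (by simpa using hf)]
      · simp [hc, Ne.symm hc, ih, Nat.lt_succ_iff.mp (by simpa using hf)]

theorem pv_replace_single (o n : Char) (s : List Char) :
    PySem.Chars.replace s [o] [n] = s.map (fun c => if c = o then n else c) := by
  simp [PySem.Chars.replace, pv_go_single o n s [] s.length le_rfl]

-- the four successive single-character maps compose to pvChar
theorem pv_compose (c : Char) :
    (if (if (if (if c = 'B' then '1' else c) = 'F' then '0' else
         (if c = 'B' then '1' else c)) = 'R' then '1' else
        (if (if c = 'B' then '1' else c) = 'F' then '0' else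
         (if c = 'B' then '1' else c))) = 'L' then '0' else
       (if (if (if c = 'B' then '1' else c) = 'F' then '0' else
            (if c = 'B' then '1' else c)) = 'R' then '1' else
           (if (if c = 'B' then '1' else c) = 'F' then '0' else
            (if c = 'B' then '1' else c)))) = pvChar c := by
  by_cases h1 : c = 'B' <;> by_cases h2 : c = 'F' <;> by_cases h3 : c = 'R' <;>
    by_cases h4 : c = 'L' <;> simp_all [pvChar]

-- B's accumulator loop computes the pointwise map
theorem pv_goB_eq (s : List Char) : ∀ (acc : List Char),
    pvGoB acc s = acc.reverse ++ s.map pvChar := by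
  induction s with
  | nil => intro acc; simp [pvGoB]
  | cons c t ih =>
    intro acc
    simp only [pvGoB, List.map_cons,
      show ("BR" : String).toList = ['B', 'R'] from rfl,
      show ("FL" : String).toList = ['F', 'L'] from rfl]
    split_ifs with hBR hFL
    · rcases (by simpa using hBR : c = 'B' ∨ c = 'R') with h | h <;>
        subst h <;> simp [ih, pvChar]
    · rcases (by simpa using hFL : c = 'F' ∨ c = 'L') with h | h <;>
        subst h <;> simp [ih, pvChar]
    · obtain ⟨hb, hr⟩ := not_or.mp (by simpa using hBR)
      obtain ⟨hf, hl⟩ := not_or.mp (by simpa using hFL)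
      simp [ih, pvChar, hb, hr, hf, hl]

-- ===== VERDICT (by name: the statement is the Claim_ definition above) =====
theorem parse_seat_to_binary_spec : Claim_equal_parse_seat_to_binary := by
  intro seat _
  unfold Spec_parse_seat_to_binary parse_seat_to_binary parse_seat_to_binary_alt
  simp only [show PySem.Dict.items (PySem.Dict.ofList
      [("B", "1"), ("F", "0"), ("R", "1"), ("L", "0")] : PySem.Dict String String)
      = [("B", "1"), ("F", "0"), ("R", "1"), ("L", "0")] by decide]
  simp only [List.foldl, PySem.Str.replace]
  simp only [show ("B" : String).toList = ['B'] by rfl, show ("F" : String).toList = ['F'] by rfl,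
             show ("R" : String).toList = ['R'] by rfl, show ("L" : String).toList = ['L'] by rfl,
             show ("1" : String).toList = ['1'] by rfl, show ("0" : String).toList = ['0'] by rfl]
  simp only [pv_replace_single, String.toList_ofList, List.map_map, pv_goB_eq,
             List.reverse_nil, List.nil_append]
  congr 1
  exact List.map_congr_left (fun c _ => by simpa using pv_compose c)
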